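-- pv_equiv track=rewrite | github.com/JGCdev/gta-fivem-texture-optimizer | extract_textures.py | calculate_texture_size
-- ===== SOURCE A (Python) =====
-- def calculate_texture_size(width, height, format_str, mip_count):
--     """Calcula el tamaño total de una textura con mipmaps."""
--     if format_str == 'DXT1':
--         bytes_per_block = 8
--     else:  # DXT3, DXT5
--         bytes_per_block = 16
--
--     total = 0
--     w, h = width, height
--     for i in range(mip_count):
--         blocks_x = max(1, w // 4)
--         blocks_y = max(1, h // 4)
--         mip_size = blocks_x * blocks_y * bytes_per_block
--         total += mip_size
--         w = max(1, w // 2)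
--         h = max(1, h // 2)
--
--     return total
-- ===== SOURCE B (Python) =====
-- def calculate_texture_size(width, height, format_str, mip_count):
--     """Total DXT texture size with mipmaps.
--
--     Once both dimensions fit in a single 4x4 block (<= 7 after clamping),
--     every remaining mip level contributes exactly one block, so the tail
--     is added in one multiplication instead of being iterated.
--     """
--     bytes_per_block = 8 if format_str == 'DXT1' else 16
--     total = 0
--     w, h = width, height
--     i = 0
--     while i < mip_count and (w > 7 or h > 7):
--         total += max(1, w // 4) * max(1, h // 4) * bytes_per_block
--         w = max(1, w // 2)
--         h = max(1, h // 2)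
--         i += 1
--     if i < mip_count:
--         total += (mip_count - i) * bytes_per_block
--     return total
-- ===== Notes on version B (the rewrite author's own statement) =====
-- stated objective: faster
-- what changed: B stops A's per-level loop as soon as both dimensions fit a single 4x4 block (at most ~log2 of the dimensions iterations) and adds all remaining constant-size mip levels in one multiplication, instead of iterating all mip_count levels.
import Mathlib
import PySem

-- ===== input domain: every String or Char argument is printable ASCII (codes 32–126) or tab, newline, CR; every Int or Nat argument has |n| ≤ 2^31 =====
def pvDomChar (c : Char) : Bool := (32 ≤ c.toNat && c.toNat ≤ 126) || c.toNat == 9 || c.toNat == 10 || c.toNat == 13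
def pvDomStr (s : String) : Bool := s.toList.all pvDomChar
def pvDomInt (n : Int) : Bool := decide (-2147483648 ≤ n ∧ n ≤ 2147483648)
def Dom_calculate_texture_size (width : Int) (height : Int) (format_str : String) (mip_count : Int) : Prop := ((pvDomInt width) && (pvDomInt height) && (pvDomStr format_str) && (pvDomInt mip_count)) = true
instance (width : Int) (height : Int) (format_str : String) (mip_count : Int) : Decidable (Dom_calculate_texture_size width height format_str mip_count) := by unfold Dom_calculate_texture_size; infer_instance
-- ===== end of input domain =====

-- B stops the per-level loop once both dimensions fit one 4x4 block and adds the
-- remaining constant-size levels in a single multiplication; objective: faster.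

-- ===== PORT A =====
-- one iteration of A's loop body on the carried state (total, w, h); the loop variable is unused
def ctsStep (bytes_per_block : Int) (st : Int × Int × Int) (_i : Int) : Int × Int × Int :=
  let blocks_x := max 1 (PySem.Int.floordiv st.2.1 4)
  let blocks_y := max 1 (PySem.Int.floordiv st.2.2 4)
  let mip_size := blocks_x * blocks_y * bytes_per_block
  (st.1 + mip_size, max 1 (PySem.Int.floordiv st.2.1 2), max 1 (PySem.Int.floordiv st.2.2 2))

def calculate_texture_size (width : Int) (height : Int) (format_str : String) (mip_count : Int) : Int :=
  let bytes_per_block : Int := if format_str == "DXT1" then 8 else 16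
  ((PySem.List.pyRange 0 mip_count 1).foldl (ctsStep bytes_per_block) (0, width, height)).1

-- ===== PORT B =====
-- B's while loop; the fuel n encodes the remaining level count mip_count - i,
-- which bounds the loop (the condition i < mip_count becomes n = 0).
-- When the size condition fails with n levels left, the tail total += (mip_count - i) * bpb is n * bpb.
def ctsLoop (bpb : Int) (w h : Int) (n : Nat) (total : Int) : Int :=
  match n with
  | 0 => total
  | Nat.succ m =>
    if w > 7 ∨ h > 7 then
      ctsLoop bpb (max 1 (PySem.Int.floordiv w 2)) (max 1 (PySem.Int.floordiv h 2)) m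
        (total + max 1 (PySem.Int.floordiv w 4) * max 1 (PySem.Int.floordiv h 4) * bpb)
    else
      total + (m + 1 : Int) * bpb

def calculate_texture_size_alt (width : Int) (height : Int) (format_str : String) (mip_count : Int) : Int :=
  let bytes_per_block : Int := if format_str == "DXT1" then 8 else 16
  ctsLoop bytes_per_block width height mip_count.toNat 0

-- ===== PRECONDITION & SPEC =====
def Spec_calculate_texture_size (width : Int) (height : Int) (format_str : String) (mip_count : Int) (out : Int) : Prop := out = calculate_texture_size_alt width height format_str mip_count
instance (width : Int) (height : Int) (format_str : String) (mip_count : Int) (out : Int) : Decidable (Spec_calculate_texture_size width height format_str mip_count out) := by unfold Spec_calculate_texture_size; infer_instance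

-- ===== CLAIM (what is proved, stated in full; the proofs are below) =====
def Claim_equal_calculate_texture_size : Prop := ∀ (width : Int) (height : Int) (format_str : String) (mip_count : Int), Dom_calculate_texture_size width height format_str mip_count → Spec_calculate_texture_size width height format_str mip_count (calculate_texture_size width height format_str mip_count)

-- ===== LEMMAS AND PROOFS =====

-- once a dimension is ≤ 7, its block count is 1
theorem blocks_one {w : Int} (hw : w ≤ 7) : max 1 (PySem.Int.floordiv w 4) = 1 := by
  rw [PySem.Int.floordiv_eq_ediv_of_pos (by norm_num)]
  omega

-- once a dimension is ≤ 7, it stays ≤ 7 after A's clamped halving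
theorem half_le {w : Int} (hw : w ≤ 7) : max 1 (PySem.Int.floordiv w 2) ≤ 7 := by
  rw [PySem.Int.floordiv_eq_ediv_of_pos (by norm_num)]
  omega

-- once both dimensions fit a single block, B's loop returns acc + n*bpb
-- and A's fold over any n further indices adds bpb per level
theorem foldA_small (bpb : Int) :
    ∀ (l : List Int) (t w h : Int), w ≤ 7 → h ≤ 7 →
      (l.foldl (ctsStep bpb) (t, w, h)).1 = t + (l.length : Int) * bpb := by
  intro l
  induction l with
  | nil => intro t w h _ _; simp
  | cons x l ih =>
    intro t w h hw hh
    simp only [List.foldl_cons, ctsStep, blocks_one hw, blocks_one hh]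
    rw [ih _ _ _ (half_le hw) (half_le hh)]
    push_cast [List.length_cons]
    ring

-- A's fold over any list of n indices equals B's fueled while loop
theorem foldA_eq (bpb : Int) :
    ∀ (l : List Int) (t w h : Int),
      (l.foldl (ctsStep bpb) (t, w, h)).1 = ctsLoop bpb w h l.length t := by
  intro l
  induction l with
  | nil => intro t w h; simp [ctsLoop]
  | cons x l ih =>
    intro t w h
    show (l.foldl (ctsStep bpb) (ctsStep bpb (t, w, h) x)).1 = ctsLoop bpb w h (l.length + 1) t
    by_cases hbig : w > 7 ∨ h > 7
    · rw [show ctsLoop bpb w h (l.length + 1) t = ctsLoop bpb (max 1 (PySem.Int.floordiv w 2))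
          (max 1 (PySem.Int.floordiv h 2)) l.length
          (t + max 1 (PySem.Int.floordiv w 4) * max 1 (PySem.Int.floordiv h 4) * bpb)
          from by simp [ctsLoop, hbig]]
      rw [← ih]
      rfl
    · push Not at hbig
      rw [show ctsLoop bpb w h (l.length + 1) t = t + (l.length + 1 : Int) * bpb
          from by simp [ctsLoop, hbig.1.not_gt, hbig.2.not_gt]]
      have : (ctsStep bpb (t, w, h) x) = (t + bpb, max 1 (PySem.Int.floordiv w 2),
          max 1 (PySem.Int.floordiv h 2)) := by
        simp only [ctsStep, blocks_one hbig.1, blocks_one hbig.2]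
        norm_num
      rw [this, foldA_small bpb l _ _ _ (half_le hbig.1) (half_le hbig.2)]
      ring

-- ===== VERDICT (by name: the statement is the Claim_ definition above) =====
theorem calculate_texture_size_spec : Claim_equal_calculate_texture_size := by
  intro width height format_str mip_count _
  unfold Spec_calculate_texture_size calculate_texture_size calculate_texture_size_alt
  rw [foldA_eq]
  simp [PySem.List.length_pyRange_one]
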